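-- pv_equiv track=rewrite | github.com/ykfnxx/simu-emperor | src/simu_emperor/memory/segment_searcher.py | _extract_timestamp_range
-- ===== SOURCE A (Python) =====
-- def _extract_timestamp_range(events: list[dict]) -> tuple[str | None, str | None]:
--     """
--     Extract timestamp range from event list.
--
--     Args:
--         events: List of event dicts
--
--     Returns:
--         Tuple of (timestamp_start, timestamp_end) or (None, None)
--     """
--     timestamps = []
--     for event in events:
--         timestamp = event.get("timestamp") or event.get("created_at")
--         if timestamp:
--             timestamps.append(timestamp)
--
--     if timestamps:
--         return min(timestamps), max(timestamps)
--     return None, None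
-- ===== SOURCE B (Python) =====
-- def _extract_timestamp_range(events: list[dict]) -> tuple[str | None, str | None]:
--     """Single pass keeping running start/end instead of collecting then reducing."""
--     start = None
--     end = None
--     for event in events:
--         ts = event.get("timestamp") or event.get("created_at")
--         if ts:
--             if start is None or ts < start:
--                 start = ts
--             if end is None or ts > end:
--                 end = ts
--     return start, end
-- ===== Notes on version B (the rewrite author's own statement) =====
-- stated objective: alternative
-- what changed: Replaces the collect-into-a-list-then-min/max structure with a single pass that maintains running start/end values and never builds the intermediate timestamp list.
import Mathlib
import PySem

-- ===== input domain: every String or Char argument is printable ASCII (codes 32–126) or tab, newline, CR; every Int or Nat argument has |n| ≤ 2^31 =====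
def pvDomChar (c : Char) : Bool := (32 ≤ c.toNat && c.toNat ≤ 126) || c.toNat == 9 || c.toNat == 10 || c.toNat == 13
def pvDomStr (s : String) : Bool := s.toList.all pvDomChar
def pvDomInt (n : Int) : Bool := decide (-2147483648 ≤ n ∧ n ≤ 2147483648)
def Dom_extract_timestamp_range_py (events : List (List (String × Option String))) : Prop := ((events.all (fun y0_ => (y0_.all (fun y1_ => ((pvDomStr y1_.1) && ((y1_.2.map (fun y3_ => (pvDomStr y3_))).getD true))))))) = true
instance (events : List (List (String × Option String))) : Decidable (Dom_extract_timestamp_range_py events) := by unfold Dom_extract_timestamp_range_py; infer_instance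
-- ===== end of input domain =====

-- B replaces A's collect-then-min/max structure with a single pass keeping running start/end.

-- shared helpers: `event.get(k)` on an association list (first match) and Python's `x or y` on str|None
def pvGetv (e : List (String × Option String)) (k : String) : Option String :=
  match e.find? (fun p => p.1 == k) with
  | some p => p.2
  | none => none

def pvOrStr (a b : Option String) : Option String :=
  if a = none ∨ a = some "" then b else a

-- ===== PORT A =====
def extract_timestamp_range_py (events : List (List (String × Option String))) : Option String × Option String :=
  let timestamps := events.foldl (fun acc event =>
    match pvOrStr (pvGetv event "timestamp") (pvGetv event "created_at") with
    | some s => if s ≠ "" then acc ++ [s] else acc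
    | none => acc) []
  if timestamps ≠ [] then
    (PySem.List.min? timestamps (fun x => x), PySem.List.max? timestamps (fun x => x))
  else (none, none)

-- ===== PORT B =====
def extract_timestamp_range_py_alt (events : List (List (String × Option String))) : Option String × Option String :=
  events.foldl (fun st event =>
    match pvOrStr (pvGetv event "timestamp") (pvGetv event "created_at") with
    | some s =>
      if s ≠ "" then
        ((match st.1 with | none => some s | some a => if s < a then some s else some a),
         (match st.2 with | none => some s | some b => if b < s then some s else some b))
      else st
    | none => st) (none, none)

-- ===== PRECONDITION & SPEC =====
def Spec_extract_timestamp_range_py (events : List (List (String × Option String))) (out : Option String × Option String) : Prop := out = extract_timestamp_range_py_alt events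
instance (events : List (List (String × Option String))) (out : Option String × Option String) : Decidable (Spec_extract_timestamp_range_py events out) := by unfold Spec_extract_timestamp_range_py; infer_instance

-- ===== CLAIM (what is proved, stated in full; the proofs are below) =====
def Claim_equal_extract_timestamp_range_py : Prop := ∀ (events : List (List (String × Option String))), Dom_extract_timestamp_range_py events → Spec_extract_timestamp_range_py events (extract_timestamp_range_py events)

-- ===== LEMMAS AND PROOFS =====

-- the (possibly empty) timestamp contributed by one event
def tsList (event : List (String × Option String)) : List String :=
  match pvOrStr (pvGetv event "timestamp") (pvGetv event "created_at") with
  | some s => if s ≠ "" then [s] else []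
  | none => []

theorem collect_eq (events : List (List (String × Option String))) (acc : List String) :
    events.foldl (fun acc event =>
      match pvOrStr (pvGetv event "timestamp") (pvGetv event "created_at") with
      | some s => if s ≠ "" then acc ++ [s] else acc
      | none => acc) acc = acc ++ events.flatMap tsList := by
  induction events generalizing acc with
  | nil => simp
  | cons e rest ih =>
    simp only [List.foldl_cons, List.flatMap_cons, ih]
    have : (match pvOrStr (pvGetv e "timestamp") (pvGetv e "created_at") with
      | some s => if s ≠ "" then acc ++ [s] else acc
      | none => acc) = acc ++ tsList e := by
      unfold tsList
      rcases h : pvOrStr (pvGetv e "timestamp") (pvGetv e "created_at") with _ | s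
      · simp
      · by_cases hs : s = "" <;> simp [hs]
    rw [this, List.append_assoc]

theorem min_push (acc : List String) (s : String) :
    (match PySem.List.min? acc (fun x => x) with
      | none => some s | some a => if s < a then some s else some a)
    = PySem.List.min? (acc ++ [s]) (fun x => x) := by
  cases acc with
  | nil => simp [PySem.List.min?]
  | cons x t =>
    rw [PySem.List.min?_id_cons, show (x :: t) ++ [s] = x :: (t ++ [s]) from rfl,
        PySem.List.min?_id_cons, List.foldl_append]
    simp only [List.foldl_cons, List.foldl_nil]
    split
    next h => exact congrArg some (min_eq_right (le_of_lt h)).symm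
    next h => exact congrArg some (min_eq_left (not_lt.mp h)).symm

theorem max_push (acc : List String) (s : String) :
    (match PySem.List.max? acc (fun x => x) with
      | none => some s | some b => if b < s then some s else some b)
    = PySem.List.max? (acc ++ [s]) (fun x => x) := by
  cases acc with
  | nil => simp [PySem.List.max?]
  | cons x t =>
    rw [PySem.List.max?_id_cons, show (x :: t) ++ [s] = x :: (t ++ [s]) from rfl,
        PySem.List.max?_id_cons, List.foldl_append]
    simp only [List.foldl_cons, List.foldl_nil]
    split
    next h => exact congrArg some (max_eq_right (le_of_lt h)).symm
    next h => exact congrArg some (max_eq_left (not_lt.mp h)).symm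

theorem alt_state (events : List (List (String × Option String))) (acc : List String) :
    events.foldl (fun st event =>
      match pvOrStr (pvGetv event "timestamp") (pvGetv event "created_at") with
      | some s =>
        if s ≠ "" then
          ((match st.1 with | none => some s | some a => if s < a then some s else some a),
           (match st.2 with | none => some s | some b => if b < s then some s else some b))
        else st
      | none => st)
      (PySem.List.min? acc (fun x => x), PySem.List.max? acc (fun x => x))
    = (PySem.List.min? (acc ++ events.flatMap tsList) (fun x => x),
       PySem.List.max? (acc ++ events.flatMap tsList) (fun x => x)) := by
  induction events generalizing acc with
  | nil => simp
  | cons e rest ih =>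
    simp only [List.foldl_cons, List.flatMap_cons]
    have hstep : (match pvOrStr (pvGetv e "timestamp") (pvGetv e "created_at") with
      | some s =>
        if s ≠ "" then
          ((match PySem.List.min? acc (fun x => x) with
             | none => some s | some a => if s < a then some s else some a),
           (match PySem.List.max? acc (fun x => x) with
             | none => some s | some b => if b < s then some s else some b))
        else (PySem.List.min? acc (fun x => x), PySem.List.max? acc (fun x => x))
      | none => (PySem.List.min? acc (fun x => x), PySem.List.max? acc (fun x => x)))
      = (PySem.List.min? (acc ++ tsList e) (fun x => x),
         PySem.List.max? (acc ++ tsList e) (fun x => x)) := by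
      unfold tsList
      rcases h : pvOrStr (pvGetv e "timestamp") (pvGetv e "created_at") with _ | s
      · simp
      · by_cases hs : s = ""
        · simp [hs]
        · simp only [hs, ne_eq, not_false_iff, if_true]
          rw [min_push, max_push]
    rw [hstep, ih, List.append_assoc]

-- ===== VERDICT (by name: the statement is the Claim_ definition above) =====
theorem extract_timestamp_range_py_spec : Claim_equal_extract_timestamp_range_py := by
  intro events _
  unfold Spec_extract_timestamp_range_py extract_timestamp_range_py extract_timestamp_range_py_alt
  rw [collect_eq]
  have h := alt_state events []
  simp only [List.nil_append] at h ⊢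
  rw [show (PySem.List.min? ([] : List String) (fun x => x), PySem.List.max? ([] : List String) (fun x => x)) = ((none : Option String), (none : Option String)) from by simp] at h
  rw [h]
  by_cases hne : events.flatMap tsList = []
  · simp [hne, PySem.List.min?, PySem.List.max?]
  · simp [hne]
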